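-- pv_equiv track=rewrite | github.com/Devopsinitiate/eytgamingworld | tournaments/services/bracket.py | generate_bracket
-- ===== SOURCE A (Python) =====
-- from typing import List, Tuple
--
-- def generate_bracket(participants: List[str]) -> List[Tuple[str, str]]:
--     """Generate a simple single‑elimination bracket.
--
--     Args:
--         participants: A list of participant identifiers (e.g., usernames or IDs).
--
--     Returns:
--         A list of match tuples. Each tuple contains two participants. If the
--         number of participants is odd, the last participant receives a *bye*
--         and is paired with ``None``.
--     """
--     # Ensure deterministic ordering
--     participants = sorted(participants)
--     matches: List[Tuple[str, str]] = []
--     # Pair first with last, second with second‑last, etc.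
--     while len(participants) > 1:
--         p1 = participants.pop(0)
--         p2 = participants.pop(-1)
--         matches.append((p1, p2))
--     # Handle odd participant count
--     if participants:
--         matches.append((participants[0], None))
--     return matches
-- ===== SOURCE B (Python) =====
-- from typing import List, Tuple
--
-- def generate_bracket(participants: List[str]) -> List[Tuple[str, str]]:
--     """Sort once, then pair by index (first with last) -- no quadratic pop(0)."""
--     s = sorted(participants)
--     half = len(s) // 2
--     matches = list(zip(s[:half], s[::-1][:half]))
--     if len(s) % 2 == 1:
--         matches.append((s[half], None))
--     return matches
-- ===== Notes on version B (the rewrite author's own statement) =====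
-- stated objective: faster
-- what changed: Replaces the destructive while-loop popping the head (O(n) each) and tail of the sorted list with a single sort followed by index pairing via zip of the first half with the reversed list.
import Mathlib
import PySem

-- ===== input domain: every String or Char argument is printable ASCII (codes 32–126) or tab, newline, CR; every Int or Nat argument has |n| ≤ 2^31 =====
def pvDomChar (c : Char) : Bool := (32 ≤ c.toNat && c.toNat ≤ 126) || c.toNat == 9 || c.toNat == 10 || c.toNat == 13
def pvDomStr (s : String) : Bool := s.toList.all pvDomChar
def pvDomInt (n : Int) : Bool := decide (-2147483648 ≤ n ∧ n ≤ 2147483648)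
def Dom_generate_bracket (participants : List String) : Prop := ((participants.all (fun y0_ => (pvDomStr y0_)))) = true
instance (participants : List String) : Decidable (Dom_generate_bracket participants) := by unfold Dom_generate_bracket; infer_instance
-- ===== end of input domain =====

-- B replaces A's quadratic pop(0)/pop(-1) while-loop by one sort plus index pairing (zip with the reversed list).

-- ===== PORT A =====
-- while len(participants) > 1: p1 = pop(0); p2 = pop(-1); matches.append((p1, p2))
-- then: if participants: matches.append((participants[0], None))
def bracketLoop : List String → List (Option String × Option String)
  | [] => []
  | [x] => [(some x, none)]
  | x :: y :: xs =>
      (some x, some ((y :: xs).getLast (by simp))) :: bracketLoop ((y :: xs).dropLast)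
termination_by l => l.length
decreasing_by simp

def generate_bracket (participants : List String) : List (Option String × Option String) :=
  bracketLoop (PySem.List.sorted participants (fun s => s) false)

-- ===== PORT B =====
-- s = sorted(participants); half = len(s)//2; matches = list(zip(s[:half], s[::-1][:half]))
-- if len(s) % 2 == 1: matches.append((s[half], None))
def generate_bracket_alt (participants : List String) : List (Option String × Option String) :=
  let s := PySem.List.sorted participants (fun x => x) false
  let half := s.length / 2
  let ms := ((s.take half).zip (s.reverse.take half)).map
    (fun p => ((some p.1 : Option String), (some p.2 : Option String)))
  if s.length % 2 = 1 then
    ms ++ [(some (PySem.List.pyGetD s (half : Int) ""), none)]  -- s[half]; in range (half < len s when len odd)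
  else ms

-- ===== PRECONDITION & SPEC =====
def Spec_generate_bracket (participants : List String) (out : List (Option String × Option String)) : Prop := out = generate_bracket_alt participants
instance (participants : List String) (out : List (Option String × Option String)) : Decidable (Spec_generate_bracket participants out) := by unfold Spec_generate_bracket; infer_instance

-- ===== CLAIM (what is proved, stated in full; the proofs are below) =====
def Claim_equal_generate_bracket : Prop := ∀ (participants : List String), Dom_generate_bracket participants → Spec_generate_bracket participants (generate_bracket participants)

-- ===== LEMMAS AND PROOFS =====

-- B's body, as a function of the already-sorted list
def pairIdx (l : List String) : List (Option String × Option String) :=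
  ((l.take (l.length / 2)).zip (l.reverse.take (l.length / 2))).map
    (fun p => ((some p.1 : Option String), (some p.2 : Option String)))
  ++ (if l.length % 2 = 1 then [(some (l.getD (l.length / 2) ""), none)] else [])

lemma pairIdx_step (x z : String) (m : List String) :
    pairIdx (x :: (m ++ [z])) = (some x, some z) :: pairIdx m := by
  have hlen : (x :: (m ++ [z])).length = m.length + 2 := by simp
  have hdiv : (m.length + 2) / 2 = m.length / 2 + 1 := by omega
  have hmod : (m.length + 2) % 2 = m.length % 2 := by omega
  have hle : m.length / 2 ≤ m.length := Nat.div_le_self _ _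
  have htake1 : (x :: (m ++ [z])).take ((x :: (m ++ [z])).length / 2)
      = x :: m.take (m.length / 2) := by
    rw [hlen, hdiv]
    simp [List.take_append_of_le_length hle]
  have htake2 : (x :: (m ++ [z])).reverse.take ((x :: (m ++ [z])).length / 2)
      = z :: m.reverse.take (m.length / 2) := by
    rw [hlen, hdiv]
    have : (x :: (m ++ [z])).reverse = z :: (m.reverse ++ [x]) := by simp
    rw [this]
    simp [List.take_append_of_le_length, Nat.div_le_self]
  unfold pairIdx
  rw [htake1, htake2, hlen, hdiv, hmod]
  by_cases hodd : m.length % 2 = 1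
  · have hlt : m.length / 2 < m.length := by omega
    simp [hodd, List.getElem?_append_left hlt]
  · simp [hodd]

lemma bracketLoop_eq_pairIdx (l : List String) : bracketLoop l = pairIdx l := by
  induction l using bracketLoop.induct with
  | case1 => simp [bracketLoop, pairIdx]
  | case2 x => simp [bracketLoop, pairIdx, List.getD]
  | case3 x y xs ih =>
      have hne : (y :: xs) ≠ ([] : List String) := by simp
      have hdecomp : y :: xs = (y :: xs).dropLast ++ [(y :: xs).getLast hne] :=
        (List.dropLast_append_getLast hne).symm
      rw [bracketLoop, ih]
      conv_rhs => rw [show (x :: y :: xs) = x :: ((y :: xs).dropLast ++ [(y :: xs).getLast hne]) from by rw [← hdecomp]]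
      exact (pairIdx_step x ((y :: xs).getLast hne) ((y :: xs).dropLast)).symm

lemma alt_eq_pairIdx (participants : List String) :
    generate_bracket_alt participants = pairIdx (PySem.List.sorted participants (fun x => x) false) := by
  unfold generate_bracket_alt pairIdx
  simp only [PySem.List.pyGetD_natCast, PySem.List.length_sorted]
  split <;> simp [List.getD]

-- ===== VERDICT (by name: the statement is the Claim_ definition above) =====
theorem generate_bracket_spec : Claim_equal_generate_bracket := by
  intro participants _
  unfold Spec_generate_bracket generate_bracket
  rw [bracketLoop_eq_pairIdx, alt_eq_pairIdx]
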